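-- pv_equiv track=rewrite | github.com/tbowen00/everly-backend | services/lead_scorer.py | normalize_industry
-- ===== SOURCE A (Python) =====
-- def normalize_industry(raw_industry, source):
--     """
--     Normalize industry names across sources
--     """
--     industry_map = {
--         'healthcare': ['healthcare', 'health', 'medical', 'dental', 'dentist', 'doctor', 'physician', 'vet', 'veterinary'],
--         'home_services': ['home_services', 'contractor', 'construction', 'plumbing', 'roofing', 'electrician', 'hvac'],
--         'food': ['food', 'restaurant', 'cafe', 'bakery', 'catering'],
--         'legal': ['legal', 'lawyer', 'attorney', 'law', 'accounting'],
--         'wellness': ['wellness', 'spa', 'gym', 'fitness', 'salon', 'beauty'],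
--         'retail': ['retail', 'store', 'shop', 'boutique'],
--     }
--
--     if not raw_industry:
--         return 'other'
--
--     raw_lower = raw_industry.lower()
--
--     for normalized, keywords in industry_map.items():
--         if any(keyword in raw_lower for keyword in keywords):
--             return normalized
--
--     return 'other'
-- ===== SOURCE B (Python) =====
-- # Different algorithm: instead of scanning the keyword table and substring-testing each
-- # keyword, scan the *positions* of the lowered input and look each candidate substring
-- # (all keyword lengths are 3..13) up in a precomputed keyword -> (priority, category)
-- # hash table, keeping the hit of minimal priority (= first-match order of the original).
--
-- _CATEGORIES = [
--     ('healthcare', ['healthcare', 'health', 'medical', 'dental', 'dentist', 'doctor', 'physician', 'vet', 'veterinary']),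
--     ('home_services', ['home_services', 'contractor', 'construction', 'plumbing', 'roofing', 'electrician', 'hvac']),
--     ('food', ['food', 'restaurant', 'cafe', 'bakery', 'catering']),
--     ('legal', ['legal', 'lawyer', 'attorney', 'law', 'accounting']),
--     ('wellness', ['wellness', 'spa', 'gym', 'fitness', 'salon', 'beauty']),
--     ('retail', ['retail', 'store', 'shop', 'boutique']),
-- ]
--
-- _KW = {}
-- for _cat, _kws in _CATEGORIES:
--     for _kw in _kws:
--         _KW[_kw] = (len(_KW), _cat)
--
-- def normalize_industry(raw_industry, source):
--     if not raw_industry: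
--         return 'other'
--     s = raw_industry.lower()
--     best = None
--     for i in range(len(s)):
--         for size in range(3, 14):
--             hit = _KW.get(s[i:i + size])
--             if hit is not None and (best is None or hit[0] < best[0]):
--                 best = hit
--     return 'other' if best is None else best[1]
-- ===== Notes on version B (the rewrite author's own statement) =====
-- stated objective: alternative
-- what changed: Instead of scanning the keyword table and substring-testing every keyword against the input, B scans the positions of the lowered input, looks each candidate slice (keyword lengths 3-13) up in a precomputed keyword->(priority,category) dict, and keeps the hit of minimal priority, which reproduces A's first-match order exactly.
import Mathlib
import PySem

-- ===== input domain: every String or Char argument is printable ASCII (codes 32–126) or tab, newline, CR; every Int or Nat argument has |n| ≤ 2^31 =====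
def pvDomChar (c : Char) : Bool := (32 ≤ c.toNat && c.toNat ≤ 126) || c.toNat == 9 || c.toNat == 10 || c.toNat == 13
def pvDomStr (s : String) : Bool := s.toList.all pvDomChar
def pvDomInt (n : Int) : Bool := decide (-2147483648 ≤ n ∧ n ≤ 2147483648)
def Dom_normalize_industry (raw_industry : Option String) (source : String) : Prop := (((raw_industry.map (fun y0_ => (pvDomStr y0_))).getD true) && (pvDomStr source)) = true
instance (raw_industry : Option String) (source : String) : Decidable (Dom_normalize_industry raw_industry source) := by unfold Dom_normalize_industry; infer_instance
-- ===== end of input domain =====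

-- B replaces A's scan of the keyword table (substring-testing every keyword) by a scan of the
-- POSITIONS of the lowered input, looking each candidate slice (keyword lengths are 3..13) up
-- in a precomputed keyword -> (priority, category) map and keeping the minimal-priority hit
-- (objective: alternative algorithm, same exact first-match result).

-- ===== PORT A =====
-- industry_map: dict in insertion order, as a list of (category, keywords)
def pvIndustryMap : List (String × List String) := [
  ("healthcare", ["healthcare", "health", "medical", "dental", "dentist", "doctor", "physician", "vet", "veterinary"]),
  ("home_services", ["home_services", "contractor", "construction", "plumbing", "roofing", "electrician", "hvac"]),
  ("food", ["food", "restaurant", "cafe", "bakery", "catering"]),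
  ("legal", ["legal", "lawyer", "attorney", "law", "accounting"]),
  ("wellness", ["wellness", "spa", "gym", "fitness", "salon", "beauty"]),
  ("retail", ["retail", "store", "shop", "boutique"])]

-- the 'for normalized, keywords in industry_map.items(): if any(...): return normalized' loop
def pvLoopA (raw : String) : List (String × List String) → String
  | [] => "other"
  | (c, ks) :: rest => if ks.any (fun k => PySem.Str.isIn k raw) then c else pvLoopA raw rest

def normalize_industry (raw_industry : Option String) (source : String) : String :=
  match raw_industry with
  | none => "other"                              -- 'if not raw_industry' (None is falsy)
  | some s =>
    if s = "" then "other"                        -- '' is falsy too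
    else pvLoopA (PySem.Str.lower s) pvIndustryMap

-- ===== PORT B =====
-- the module-level '_KW' dict: keyword -> (priority, category), insertion order
def pvKwPairs : List (List Char × (Int × String)) := [
  ("healthcare".toList, (0, "healthcare")),
  ("health".toList, (1, "healthcare")),
  ("medical".toList, (2, "healthcare")),
  ("dental".toList, (3, "healthcare")),
  ("dentist".toList, (4, "healthcare")),
  ("doctor".toList, (5, "healthcare")),
  ("physician".toList, (6, "healthcare")),
  ("vet".toList, (7, "healthcare")),
  ("veterinary".toList, (8, "healthcare")),
  ("home_services".toList, (9, "home_services")),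
  ("contractor".toList, (10, "home_services")),
  ("construction".toList, (11, "home_services")),
  ("plumbing".toList, (12, "home_services")),
  ("roofing".toList, (13, "home_services")),
  ("electrician".toList, (14, "home_services")),
  ("hvac".toList, (15, "home_services")),
  ("food".toList, (16, "food")),
  ("restaurant".toList, (17, "food")),
  ("cafe".toList, (18, "food")),
  ("bakery".toList, (19, "food")),
  ("catering".toList, (20, "food")),
  ("legal".toList, (21, "legal")),
  ("lawyer".toList, (22, "legal")),
  ("attorney".toList, (23, "legal")),
  ("law".toList, (24, "legal")),
  ("accounting".toList, (25, "legal")),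
  ("wellness".toList, (26, "wellness")),
  ("spa".toList, (27, "wellness")),
  ("gym".toList, (28, "wellness")),
  ("fitness".toList, (29, "wellness")),
  ("salon".toList, (30, "wellness")),
  ("beauty".toList, (31, "wellness")),
  ("retail".toList, (32, "retail")),
  ("store".toList, (33, "retail")),
  ("shop".toList, (34, "retail")),
  ("boutique".toList, (35, "retail"))]

def pvKwDict : PySem.Dict (List Char) (Int × String) := PySem.Dict.mk pvKwPairs

-- 'if hit is not None and (best is None or hit[0] < best[0]): best = hit'
def pvMergeHit (best : Option (Int × String)) (hit : Option (Int × String)) : Option (Int × String) :=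
  match hit with
  | none => best
  | some h =>
    match best with
    | none => some h
    | some bb => if h.1 < bb.1 then some h else some bb

def normalize_industry_alt (raw_industry : Option String) (source : String) : String :=
  match raw_industry with
  | none => "other"
  | some st =>
    if st = "" then "other"
    else
      let s := PySem.Chars.lower st.toList
      let best := (PySem.List.pyRange 0 (s.length : Int) 1).foldl
        (fun b i => (PySem.List.pyRange 3 14 1).foldl
          (fun b size =>
            pvMergeHit b (pvKwDict.get? (PySem.List.slice s (some i) (some (i + size))))) b) none
      match best with
      | none => "other"
      | some bb => bb.2

-- ===== PRECONDITION & SPEC =====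
def Spec_normalize_industry (raw_industry : Option String) (source : String) (out : String) : Prop := out = normalize_industry_alt raw_industry source
instance (raw_industry : Option String) (source : String) (out : String) : Decidable (Spec_normalize_industry raw_industry source out) := by unfold Spec_normalize_industry; infer_instance

-- ===== CLAIM (what is proved, stated in full; the proofs are below) =====
def Claim_equal_normalize_industry : Prop := ∀ (raw_industry : Option String) (source : String), Dom_normalize_industry raw_industry source → Spec_normalize_industry raw_industry source (normalize_industry raw_industry source)

-- ===== LEMMAS AND PROOFS =====

-- result of an Option find?, as A's loop renders it
def pvCatOf (o : Option (List Char × Int × String)) : String :=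
  match o with
  | none => "other"
  | some e => e.2.2

-- the six blocks of pvKwPairs, one per category of pvIndustryMap
def pvGroups : List ((String × List String) × List (List Char × Int × String)) :=
  [(("healthcare", ["healthcare", "health", "medical", "dental", "dentist", "doctor", "physician", "vet", "veterinary"]), (pvKwPairs.drop 0).take 9),
   (("home_services", ["home_services", "contractor", "construction", "plumbing", "roofing", "electrician", "hvac"]), (pvKwPairs.drop 9).take 7),
   (("food", ["food", "restaurant", "cafe", "bakery", "catering"]), (pvKwPairs.drop 16).take 5),
   (("legal", ["legal", "lawyer", "attorney", "law", "accounting"]), (pvKwPairs.drop 21).take 5),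
   (("wellness", ["wellness", "spa", "gym", "fitness", "salon", "beauty"]), (pvKwPairs.drop 26).take 6),
   (("retail", ["retail", "store", "shop", "boutique"]), (pvKwPairs.drop 32).take 4)]

-- 'keep the strictly smaller priority, prefer the incumbent on ties' is associative
theorem pvMergeHit_assoc (a x y : Option (Int × String)) :
    pvMergeHit (pvMergeHit a x) y = pvMergeHit a (pvMergeHit x y) := by
  rcases a with _ | a <;> rcases x with _ | x <;> rcases y with _ | y <;> try rfl
  all_goals simp only [pvMergeHit]
  all_goals split_ifs <;> try rfl
  all_goals simp only [pvMergeHit]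
  all_goals split_ifs <;> first | rfl | omega

theorem pvMergeHit_none_left (o : Option (Int × String)) : pvMergeHit none o = o := by
  rcases o with _ | o <;> rfl

-- merging one element of a priority-sorted list into its first match moves it into the search
theorem pvMergeHit_find?_some (h : Int × String) (D : List (Int × String)) (hh : h ∈ D)
    (hsort : D.Pairwise (fun a b => a.1 < b.1)) (q : Int × String → Bool) :
    pvMergeHit (some h) (D.find? q) = D.find? (fun v => decide (h = v) || q v) := by
  induction D with
  | nil => cases hh
  | cons d D ih =>
    rw [List.pairwise_cons] at hsort
    by_cases hd : h = d
    · subst hd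
      rw [List.find?_cons_of_pos (p := fun v => decide (h = v) || q v) (by simp)]
      by_cases hq : q h
      · rw [List.find?_cons_of_pos (p := q) hq]
        simp only [pvMergeHit]
        rw [if_neg (by omega)]
      · rw [List.find?_cons_of_neg (p := q) hq]
        cases hf : D.find? q with
        | none => rfl
        | some e =>
          have he : e ∈ D := List.mem_of_find?_eq_some hf
          have := hsort.1 e he
          simp only [pvMergeHit]
          rw [if_neg (by omega)]
    · have hh' : h ∈ D := by
        rcases List.mem_cons.mp hh with h1 | h1
        · exact absurd h1 hd
        · exact h1
      have hdl : d.1 < h.1 := hsort.1 h hh'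
      by_cases hq : q d
      · rw [List.find?_cons_of_pos (p := q) hq,
            List.find?_cons_of_pos (p := fun v => decide (h = v) || q v) (by simp [hq])]
        simp only [pvMergeHit]
        rw [if_pos hdl]
      · rw [List.find?_cons_of_neg (p := q) hq,
            List.find?_cons_of_neg (p := fun v => decide (h = v) || q v) (by simp [hq, hd])]
        exact ih hh' hsort.2

theorem pvMergeHit_find? (hit? : Option (Int × String)) (D : List (Int × String))
    (hmem : ∀ h, hit? = some h → h ∈ D) (hsort : D.Pairwise (fun a b => a.1 < b.1))
    (q : Int × String → Bool) :
    pvMergeHit hit? (D.find? q) = D.find? (fun v => decide (hit? = some v) || q v) := by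
  cases hit? with
  | none => rw [pvMergeHit_none_left]; simp
  | some h =>
    rw [pvMergeHit_find?_some h D (hmem h rfl) hsort q]
    simp

-- the fold with pvMergeHit computes the first (= minimal-priority) hit element of D
theorem pvFoldMerge {α : Type} (g : α → Option (Int × String)) (D : List (Int × String))
    (hsort : D.Pairwise (fun a b => a.1 < b.1)) :
    ∀ (xs : List α) (b : Option (Int × String)), (∀ x ∈ xs, ∀ v, g x = some v → v ∈ D) →
    xs.foldl (fun b x => pvMergeHit b (g x)) b
      = pvMergeHit b (D.find? (fun v => xs.any (fun x => decide (g x = some v)))) := by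
  intro xs
  induction xs with
  | nil =>
    intro b _
    have : D.find? (fun v => ([] : List α).any (fun x => decide (g x = some v))) = none := by
      rw [List.find?_eq_none]; simp
    rw [this]; rfl
  | cons x xs ih =>
    intro b hg
    have hx : ∀ v, g x = some v → v ∈ D := fun v hv => hg x (List.mem_cons_self ..) v hv
    rw [List.foldl_cons, ih (pvMergeHit b (g x)) (fun y hy v hv => hg y (List.mem_cons_of_mem _ hy) v hv),
        pvMergeHit_assoc, pvMergeHit_find? (g x) D hx hsort]
    simp only [List.any_cons]

-- find? only looks at the predicate on members
theorem pvFind?_congr {α : Type} (l : List α) (p q : α → Bool) (h : ∀ e ∈ l, p e = q e) :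
    l.find? p = l.find? q := by
  induction l with
  | nil => rfl
  | cons a l ih =>
    by_cases ha : q a = true
    · rw [List.find?_cons_of_pos ((h a (List.mem_cons_self ..)).trans ha),
          List.find?_cons_of_pos ha]
    · rw [List.find?_cons_of_neg (by rw [h a (List.mem_cons_self ..)]; exact ha),
          List.find?_cons_of_neg ha]
      exact ih (fun e he => h e (List.mem_cons_of_mem _ he))

-- facts about the literal table
theorem pvVals_sorted : (pvKwPairs.map (fun e => e.2)).Pairwise (fun a b => a.1 < b.1) := by decide
theorem pvVals_nodup : (pvKwPairs.map (fun e => e.2)).Nodup := by decide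
theorem pvKw_len : ∀ e ∈ pvKwPairs, 3 ≤ e.1.length ∧ e.1.length ≤ 13 := by decide
theorem pvKw_get : ∀ e ∈ pvKwPairs, pvKwDict.get? e.1 = some e.2 := by decide

-- hits of the dict lookup are values of the table
theorem pvHit_mem (k : List Char) (v : Int × String) (h : pvKwDict.get? k = some v) :
    v ∈ pvKwPairs.map (fun e => e.2) := by
  have hm : (k, v) ∈ pvKwDict.items := PySem.Dict.mem_items_of_get?_eq_some pvKwDict h
  exact List.mem_map.mpr ⟨(k, v), hm, rfl⟩

-- the position/length scan finds e.2 somewhere iff e's keyword is a substring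
theorem pvAny_eq_isIn (s : List Char) (e : List Char × Int × String) (he : e ∈ pvKwPairs) :
    (((PySem.List.pyRange 0 (s.length : Int) 1).flatMap
        (fun i => (PySem.List.pyRange 3 14 1).map (fun L => (i, L)))).any
      (fun x => decide (pvKwDict.get? (PySem.List.slice s (some x.1) (some (x.1 + x.2))) = some e.2)))
    = PySem.Chars.isIn e.1 s := by
  cases hr : PySem.Chars.isIn e.1 s with
  | false =>
    rw [List.any_eq_false]
    intro x hx
    simp only [decide_eq_true_eq]
    intro hget
    -- the hit key is in the table with value e.2, hence equals e.1; slices are infixes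
    rcases List.mem_flatMap.mp hx with ⟨i, hi, hx2⟩
    rcases List.mem_map.mp hx2 with ⟨L, hL, hxeq⟩
    subst hxeq
    have hi0 : 0 ≤ i := (PySem.List.mem_pyRange_one.mp hi).1
    have hL0 : 0 ≤ L := le_trans (by norm_num) (PySem.List.mem_pyRange_one.mp hL).1
    obtain ⟨n, rfl⟩ : ∃ n : ℕ, i = (n : Int) := ⟨i.toNat, (Int.toNat_of_nonneg hi0).symm⟩
    obtain ⟨m, rfl⟩ : ∃ m : ℕ, L = (m : Int) := ⟨L.toNat, (Int.toNat_of_nonneg hL0).symm⟩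
    have hkm : (PySem.List.slice s (some (n : Int)) (some ((n : Int) + (m : Int))), e.2) ∈ pvKwPairs :=
      PySem.Dict.mem_items_of_get?_eq_some pvKwDict hget
    have hke : (PySem.List.slice s (some (n : Int)) (some ((n : Int) + (m : Int))), e.2) = e := by
      exact List.inj_on_of_nodup_map (f := fun e => e.2) pvVals_nodup hkm he rfl
    have hkey : PySem.List.slice s (some (n : Int)) (some ((n : Int) + (m : Int))) = e.1 := by
      rw [← hke]
    rw [PySem.List.slice_natCast_add] at hkey
    have hinf : e.1 <:+: s := by
      rw [← hkey]
      exact (List.take_prefix _ _).isInfix.trans (List.drop_suffix _ _).isInfix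
    exact (PySem.Chars.isIn_eq_false_iff e.1 s).mp hr hinf
  | true =>
    rcases (PySem.Chars.exists_prefix_drop_iff_isIn e.1 s).mpr hr with ⟨j, hj⟩
    have hlen := pvKw_len e he
    have hjlt : j < s.length := by
      by_contra hge
      have : List.drop j s = [] := List.drop_eq_nil_of_le (by omega)
      rw [this, List.prefix_nil] at hj
      rw [hj] at hlen
      simp at hlen
    rw [List.any_eq_true]
    refine ⟨((j : Int), (e.1.length : Int)), ?_, ?_⟩
    · refine List.mem_flatMap.mpr ⟨(j : Int), PySem.List.mem_pyRange_one.mpr ⟨by omega, by exact_mod_cast hjlt⟩, ?_⟩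
      exact List.mem_map.mpr ⟨(e.1.length : Int), PySem.List.mem_pyRange_one.mpr ⟨by omega, by omega⟩, rfl⟩
    · simp only [decide_eq_true_eq]
      have hslice : PySem.List.slice s (some (j : Int)) (some ((j : Int) + (e.1.length : Int))) = e.1 := by
        rw [PySem.List.slice_natCast_add]
        exact (List.prefix_iff_eq_take.mp hj).symm
      rw [hslice]
      exact pvKw_get e he

-- A's loop over the grouped table = first match over the flattened table
theorem pvFindBlock (s : List Char) (B rest : List (List Char × Int × String)) (c : String)
    (hc : ∀ e ∈ B, e.2.2 = c) :
    pvCatOf ((B ++ rest).find? (fun e => PySem.Chars.isIn e.1 s))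
      = if B.any (fun e => PySem.Chars.isIn e.1 s) then c
        else pvCatOf (rest.find? (fun e => PySem.Chars.isIn e.1 s)) := by
  induction B with
  | nil => simp
  | cons a B ih =>
    by_cases ha : PySem.Chars.isIn a.1 s = true
    · have hfa : List.find? (fun e => PySem.Chars.isIn e.1 s) ((a :: B) ++ rest) = some a :=
        List.find?_cons_of_pos ha
      rw [hfa, if_pos (show ((a :: B).any fun e => PySem.Chars.isIn e.1 s) = true by simp [ha])]
      simpa [pvCatOf] using hc a (List.mem_cons_self ..)
    · rw [Bool.not_eq_true] at ha
      have hfa : List.find? (fun e => PySem.Chars.isIn e.1 s) ((a :: B) ++ rest)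
          = List.find? (fun e => PySem.Chars.isIn e.1 s) (B ++ rest) :=
        List.find?_cons_of_neg (by simp [ha])
      have hcond : ((a :: B).any fun e => PySem.Chars.isIn e.1 s)
          = (B.any fun e => PySem.Chars.isIn e.1 s) := by simp [ha]
      rw [hcond, hfa, ih (fun e he => hc e (List.mem_cons_of_mem _ he))]
theorem pvLoopA_eq (raw : String) :
    ∀ (P : List ((String × List String) × List (List Char × Int × String))),
    (∀ p ∈ P, p.2.map (fun e => e.1) = p.1.2.map (fun k => k.toList) ∧ ∀ e ∈ p.2, e.2.2 = p.1.1) →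
    pvLoopA raw (P.map Prod.fst)
      = pvCatOf ((P.flatMap Prod.snd).find? (fun e => PySem.Chars.isIn e.1 raw.toList)) := by
  intro P
  induction P with
  | nil => intro _; rfl
  | cons p P ih =>
    intro h
    obtain ⟨⟨c, ks⟩, B⟩ := p
    have hp := h _ (List.mem_cons_self ..)
    simp only [List.map_cons, List.flatMap_cons]
    rw [pvFindBlock raw.toList B _ c hp.2]
    have hany : B.any (fun e => PySem.Chars.isIn e.1 raw.toList)
        = ks.any (fun k => PySem.Str.isIn k raw) := by
      have h1 : B.any (fun e => PySem.Chars.isIn e.1 raw.toList)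
          = (B.map (fun e => e.1)).any (fun k => PySem.Chars.isIn k raw.toList) := by
        rw [List.any_map]; rfl
      rw [h1, hp.1, List.any_map]
      simp only [PySem.Str.isIn_eq]
      rfl
    show pvLoopA raw ((c, ks) :: P.map Prod.fst) = _
    rw [pvLoopA, ← hany]
    by_cases hb : B.any (fun e => PySem.Chars.isIn e.1 raw.toList) = true
    · rw [if_pos hb, if_pos hb]
    · rw [if_neg hb, if_neg hb]
      exact ih (fun q hq => h q (List.mem_cons_of_mem _ hq))

theorem pvGroups_spec :
    ∀ p ∈ pvGroups, p.2.map (fun e => e.1) = p.1.2.map (fun k => k.toList) ∧ ∀ e ∈ p.2, e.2.2 = p.1.1 := by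
  decide

-- A's whole table scan, flattened
theorem pvA_char (raw : String) :
    pvLoopA raw pvIndustryMap
      = pvCatOf (pvKwPairs.find? (fun e => PySem.Chars.isIn e.1 raw.toList)) := by
  have h := pvLoopA_eq raw pvGroups pvGroups_spec
  have h1 : pvGroups.map Prod.fst = pvIndustryMap := by decide
  have h2 : pvGroups.flatMap Prod.snd = pvKwPairs := by decide
  rw [h1, h2] at h
  exact h

-- B's whole scan: double fold = first match over the flattened table
theorem pvAlt_core (s : List Char) :
    (PySem.List.pyRange 0 (s.length : Int) 1).foldl
        (fun b i => (PySem.List.pyRange 3 14 1).foldl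
          (fun b size =>
            pvMergeHit b (pvKwDict.get? (PySem.List.slice s (some i) (some (i + size))))) b) none
      = (pvKwPairs.find? (fun e => PySem.Chars.isIn e.1 s)).map (fun e => e.2) := by
  have hflat : (PySem.List.pyRange 0 (s.length : Int) 1).foldl
        (fun b i => (PySem.List.pyRange 3 14 1).foldl
          (fun b size =>
            pvMergeHit b (pvKwDict.get? (PySem.List.slice s (some i) (some (i + size))))) b) none
      = ((PySem.List.pyRange 0 (s.length : Int) 1).flatMap
          (fun i => (PySem.List.pyRange 3 14 1).map (fun L => (i, L)))).foldl
          (fun b x => pvMergeHit b (pvKwDict.get? (PySem.List.slice s (some x.1) (some (x.1 + x.2))))) none := by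
    rw [List.foldl_flatMap]
    simp only [List.foldl_map]
  have hm := pvFoldMerge
      (fun x : Int × Int => pvKwDict.get? (PySem.List.slice s (some x.1) (some (x.1 + x.2))))
      (pvKwPairs.map (fun e => e.2)) pvVals_sorted
      ((PySem.List.pyRange 0 (s.length : Int) 1).flatMap
        (fun i => (PySem.List.pyRange 3 14 1).map (fun L => (i, L)))) none
      (fun x _ v hv => pvHit_mem _ v hv)
  rw [hflat, hm, pvMergeHit_none_left, List.find?_map]
  congr 1
  apply pvFind?_congr
  intro e he
  exact pvAny_eq_isIn s e he

-- ===== VERDICT (by name: the statement is the Claim_ definition above) =====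
theorem normalize_industry_spec : Claim_equal_normalize_industry := by
  intro raw_industry source _
  unfold Spec_normalize_industry
  cases raw_industry with
  | none => rfl
  | some st =>
    show normalize_industry (some st) source = normalize_industry_alt (some st) source
    unfold normalize_industry normalize_industry_alt
    by_cases h : st = ""
    · simp [h]
    · simp only [if_neg h]
      rw [pvA_char, PySem.Str.toList_lower, pvAlt_core]
      cases (pvKwPairs.find? (fun e => PySem.Chars.isIn e.1 (PySem.Chars.lower st.toList))) with
      | none => rfl
      | some e => rfl
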